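-- pv_equiv track=rewrite | github.com/selfreferencing/erdos-86-lean | certificate_generator.py | generate_prime_witness_rule
-- ===== SOURCE A (Python) =====
-- from math import gcd, isqrt
--
-- def mod_inverse(a, m):
--     """Compute modular inverse of a mod m."""
--     return pow(a, -1, m)
--
-- def chinese_remainder(residues, moduli):
--     """
--     Solve system of congruences x ≡ r_i (mod m_i).
--     Returns (solution, lcm_of_moduli) or None if no solution.
--     """
--     if len(residues) != len(moduli):
--         raise ValueError("Mismatched lengths")
--
--     x = residues[0]
--     m = moduli[0]
--
--     for i in range(1, len(residues)):
--         r2, m2 = residues[i], moduli[i]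
--         g = gcd(m, m2)
--
--         if (r2 - x) % g != 0:
--             return None  # No solution
--
--         lcm_m = m * m2 // g
--         # Solve x ≡ x (mod m) and x ≡ r2 (mod m2)
--         # x = x + m * k where m*k ≡ (r2 - x) (mod m2)
--         m_inv = mod_inverse(m // g, m2 // g)
--         k = ((r2 - x) // g * m_inv) % (m2 // g)
--         x = (x + m * k) % lcm_m
--         m = lcm_m
--
--     return (x, m)
--
-- def generate_prime_witness_rule(k, q):
--     """
--     Generate CRT rule for k with prime witness q.
--
--     Conditions:
--     1. q | x_k ⟺ p ≡ -m_k (mod 4q)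
--     2. q ≡ -x_k (mod m_k) ⟺ p ≡ -4q (mod m_k)
--
--     Returns (residue, modulus) for the combined CRT condition, or None.
--     """
--     m_k = 4 * k + 3
--
--     if gcd(q, m_k) > 1:
--         return None  # q divides m_k, skip
--
--     # Condition 1: p ≡ -m_k (mod 4q)
--     r1 = (-m_k) % (4 * q)
--     mod1 = 4 * q
--
--     # Condition 2: p ≡ -4q (mod m_k)
--     r2 = (-4 * q) % m_k
--     mod2 = m_k
--
--     # Combine via CRT
--     result = chinese_remainder([r1, r2], [mod1, mod2])
--     if result is None:
--         return None
--
--     residue, modulus = result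
--
--     # Filter: must have p ≡ 1 (mod 4)
--     if residue % 4 != 1:
--         # Adjust to find valid residue in this class
--         # The pattern repeats every lcm(modulus, 4)
--         lcm_mod = (modulus * 4) // gcd(modulus, 4)
--         for offset in range(0, lcm_mod, modulus):
--             candidate = (residue + offset) % lcm_mod
--             if candidate % 4 == 1:
--                 return (candidate, lcm_mod)
--         return None
--
--     return (residue, modulus)
-- ===== SOURCE B (Python) =====
-- from math import gcd
--
-- def generate_prime_witness_rule(k, q):
--     # -(4q + m_k) satisfies p ≡ -m_k (mod 4q) and p ≡ -4q (mod m_k) directly,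
--     # so no general CRT solver is needed; and the combined residue is always
--     # ≡ 1 (mod 4) since m_k = 4k+3 ≡ 3 (mod 4), so no filter loop is needed.
--     m_k = 4 * k + 3
--     if gcd(q, m_k) > 1:
--         return None
--     modulus = 4 * q * m_k
--     return ((-(4 * q + m_k)) % modulus, modulus)
-- ===== Notes on version B (the rewrite author's own statement) =====
-- stated objective: simpler
-- what changed: Replaces the general list-based CRT solver (with modular inverse) and the mod-4 offset/filter loop by the direct observation that -(4q+m_k) already solves both congruences and is always 1 mod 4, so B is a three-line closed form.
-- outside the precondition, e.g. on generate_prime_witness_rule(-1, 0): A raises ZeroDivisionError, B raises ZeroDivisionError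
import Mathlib
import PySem

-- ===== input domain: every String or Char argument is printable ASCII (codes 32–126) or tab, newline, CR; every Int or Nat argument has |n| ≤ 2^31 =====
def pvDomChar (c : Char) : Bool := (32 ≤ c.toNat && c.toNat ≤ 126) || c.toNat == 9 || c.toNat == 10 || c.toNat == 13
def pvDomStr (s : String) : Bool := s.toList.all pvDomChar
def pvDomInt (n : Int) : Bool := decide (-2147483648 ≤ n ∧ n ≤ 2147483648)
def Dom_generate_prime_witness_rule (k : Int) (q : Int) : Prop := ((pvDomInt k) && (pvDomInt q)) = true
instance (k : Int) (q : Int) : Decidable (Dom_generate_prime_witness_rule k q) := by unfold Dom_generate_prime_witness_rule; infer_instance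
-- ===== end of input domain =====

-- B replaces A's general list-based CRT solver and mod-4 filter loop by a closed form
-- (objective: simpler); return values agree on all inputs where A returns (Pre_).

-- ===== PORT A =====

-- mod_inverse(a, m) = pow(a, -1, m): the builtin is ported by hand via the Bezout
-- coefficient of the extended gcd, reduced with Python's %; exact wherever Python
-- returns (gcd(a,m)=1 and m ≠ 0 — elsewhere Python raises, and A only reaches it
-- with coprime arguments inside Pre_).
def modInverse (a m : Int) : Int := PySem.Int.mod (Int.gcdA a m) m

-- chinese_remainder(residues, moduli); the len-mismatch ValueError is unreachable at
-- A's call site (two literal 2-element lists), so no length guard is materialised.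
def chineseRemainder (residues moduli : List Int) : Option (Int × Int) :=
  let x0 := PySem.List.pyGetD residues 0 0
  let m0 := PySem.List.pyGetD moduli 0 0
  (PySem.List.pyRange 1 (PySem.List.len residues) 1).foldl
    (fun st i => match st with
      | none => none
      | some (x, m) =>
        let r2 := PySem.List.pyGetD residues i 0
        let m2 := PySem.List.pyGetD moduli i 0
        let g : Int := Int.gcd m m2
        if PySem.Int.mod (r2 - x) g ≠ 0 then none
        else
          let lcm_m := PySem.Int.floordiv (m * m2) g
          let m_inv := modInverse (PySem.Int.floordiv m g) (PySem.Int.floordiv m2 g)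
          let kk := PySem.Int.mod (PySem.Int.floordiv (r2 - x) g * m_inv) (PySem.Int.floordiv m2 g)
          some (PySem.Int.mod (x + m * kk) lcm_m, lcm_m))
    (some (x0, m0))

def generate_prime_witness_rule (k : Int) (q : Int) : Option (Int × Int) :=
  let m_k := 4 * k + 3
  if ((Int.gcd q m_k : Int) > 1) then none
  else
    let r1 := PySem.Int.mod (-m_k) (4 * q)
    let mod1 := 4 * q
    let r2 := PySem.Int.mod (-4 * q) m_k
    let mod2 := m_k
    match chineseRemainder [r1, r2] [mod1, mod2] with
    | none => none
    | some (residue, modulus) =>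
      if PySem.Int.mod residue 4 ≠ 1 then
        let lcm_mod := PySem.Int.floordiv (modulus * 4) (Int.gcd modulus 4)
        (PySem.List.pyRange 0 lcm_mod modulus).foldl
          (fun acc offset => match acc with
            | some r => some r
            | none =>
              let candidate := PySem.Int.mod (residue + offset) lcm_mod
              if PySem.Int.mod candidate 4 = 1 then some (candidate, lcm_mod) else none)
          none
      else some (residue, modulus)

-- ===== PORT B =====
def generate_prime_witness_rule_alt (k : Int) (q : Int) : Option (Int × Int) :=
  let m_k := 4 * k + 3
  if ((Int.gcd q m_k : Int) > 1) then none
  else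
    let modulus := 4 * q * m_k
    some (PySem.Int.mod (-(4 * q + m_k)) modulus, modulus)

-- ===== PRECONDITION & SPEC =====
-- Pre_ excludes only (k, q) = (-1, 0): there m_k = -1, gcd(0,-1)=1, and both A and B
-- raise ZeroDivisionError (a modulo by 0); A returns normally everywhere else.
def Pre_generate_prime_witness_rule (k : Int) (q : Int) : Prop := ¬ (k = -1 ∧ q = 0)
instance (k : Int) (q : Int) : Decidable (Pre_generate_prime_witness_rule k q) := by unfold Pre_generate_prime_witness_rule; infer_instance

def pvWitness_generate_prime_witness_rule : Int × Int := (1, 1)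

def Spec_generate_prime_witness_rule (k : Int) (q : Int) (out : Option (Int × Int)) : Prop := out = generate_prime_witness_rule_alt k q
instance (k : Int) (q : Int) (out : Option (Int × Int)) : Decidable (Spec_generate_prime_witness_rule k q out) := by unfold Spec_generate_prime_witness_rule; infer_instance

-- ===== CLAIM (what is proved, stated in full; the proofs are below) =====
def Claim_equal_generate_prime_witness_rule : Prop := ∀ (k : Int) (q : Int), Dom_generate_prime_witness_rule k q → Pre_generate_prime_witness_rule k q → Spec_generate_prime_witness_rule k q (generate_prime_witness_rule k q)

-- ===== LEMMAS AND PROOFS =====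

-- Python's % is congruent to its argument.
theorem pmod_modEq (a n : Int) : PySem.Int.mod a n ≡ a [ZMOD n] := by
  have h := PySem.Int.floordiv_mul_add_mod a n
  have : n ∣ a - PySem.Int.mod a n := ⟨PySem.Int.floordiv a n, by linarith⟩
  exact (Int.modEq_iff_dvd.mpr this)

-- Python's % by a nonzero modulus depends only on the residue class.
theorem pmod_congr (a b M : Int) (hM : M ≠ 0) (h : a ≡ b [ZMOD M]) :
    PySem.Int.mod a M = PySem.Int.mod b M := by
  have hd : M ∣ PySem.Int.mod b M - PySem.Int.mod a M :=
    ((pmod_modEq a M).trans (h.trans (pmod_modEq b M).symm)).dvd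
  have hd2 : |M| ∣ PySem.Int.mod b M - PySem.Int.mod a M := (abs_dvd _ _).mpr hd
  rcases lt_or_gt_of_ne hM with hneg | hpos
  · have ha := PySem.Int.mod_neg_bounds a hneg
    have hb := PySem.Int.mod_neg_bounds b hneg
    have habs : |M| = -M := abs_of_neg hneg
    have := Int.eq_zero_of_abs_lt_dvd hd2 (by rw [abs_lt]; omega)
    omega
  · have ha1 := PySem.Int.mod_nonneg a hpos
    have ha2 := PySem.Int.mod_lt a hpos
    have hb1 := PySem.Int.mod_nonneg b hpos
    have hb2 := PySem.Int.mod_lt b hpos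
    have habs : |M| = M := abs_of_pos hpos
    have := Int.eq_zero_of_abs_lt_dvd hd2 (by rw [abs_lt]; omega)
    omega

-- evaluating chinese_remainder on A's two-element call, once g = gcd = 1
theorem cr_pair (a b c d : Int) (h : Int.gcd c d = 1) :
    chineseRemainder [a, b] [c, d] =
      some (PySem.Int.mod (a + c * PySem.Int.mod ((b - a) * modInverse c d) d) (c * d), c * d) := by
  have hrange : PySem.List.pyRange 1 (PySem.List.len [a, b]) 1 = [1] := by
    simp [PySem.List.len_eq]; decide
  unfold chineseRemainder
  rw [hrange]
  simp [PySem.List.pyGetD_ofNat', h]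

-- the heart of the equivalence: for coprime q and m_k = 4k+3, A's CRT pipeline and
-- B's closed form land on the same canonical residue.
theorem main_eq (k q : Int) (hq : q ≠ 0) (hg : Int.gcd q (4 * k + 3) = 1) :
    generate_prime_witness_rule k q = generate_prime_witness_rule_alt k q := by
  have hkm : (4 * k + 3) ≠ 0 := by omega
  set m_k := 4 * k + 3 with hmk
  -- coprimality of 4q and m_k
  have hc4 : IsCoprime (4 : Int) m_k := ⟨k + 1, -1, by rw [hmk]; ring⟩
  have hcq : IsCoprime q m_k := Int.isCoprime_iff_gcd_eq_one.mpr hg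
  have hc : IsCoprime (4 * q) m_k := IsCoprime.mul_left hc4 hcq
  have hg4 : Int.gcd (4 * q) m_k = 1 := Int.isCoprime_iff_gcd_eq_one.mp hc
  have hMne : 4 * q * m_k ≠ 0 := by
    intro h; rcases mul_eq_zero.mp h with h' | h'
    · rcases mul_eq_zero.mp h' with h'' | h'' <;> omega
    · exact hkm h'
  have hgle : ¬ ((Int.gcd q m_k : Int) > 1) := by rw [hg]; norm_num
  -- abbreviations matching A's intermediate values
  set r1 := PySem.Int.mod (-m_k) (4 * q) with hr1
  set r2 := PySem.Int.mod (-4 * q) m_k with hr2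
  set inv := modInverse (4 * q) m_k with hinv
  set kk := PySem.Int.mod ((r2 - r1) * inv) m_k with hkk
  set u := r1 + 4 * q * kk with hu
  set M := 4 * q * m_k with hM
  -- Bezout: 4q * gcdA ≡ 1 (mod m_k)
  have hbez : (1 : Int) = 4 * q * Int.gcdA (4 * q) m_k + m_k * Int.gcdB (4 * q) m_k := by
    have := Int.gcd_eq_gcd_ab (4 * q) m_k
    rw [hg4] at this; exact_mod_cast this
  have hinv_mod : inv ≡ Int.gcdA (4 * q) m_k [ZMOD m_k] := pmod_modEq _ _
  -- u ≡ -(4q + m_k) both mod 4q and mod m_k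
  have h4q : u ≡ -(4 * q + m_k) [ZMOD 4 * q] := by
    have h1 : r1 ≡ -m_k [ZMOD 4 * q] := pmod_modEq _ _
    calc u = r1 + 4 * q * kk := hu
      _ ≡ -m_k + 4 * q * kk [ZMOD 4 * q] := Int.ModEq.add_right _ h1
      _ ≡ -m_k + 0 * kk [ZMOD 4 * q] :=
          Int.ModEq.add_left _ (Int.ModEq.mul_right _ (Int.modEq_zero_iff_dvd.mpr dvd_rfl))
      _ = -(4 * q + m_k) + (4 * q) * 1 := by ring
      _ ≡ -(4 * q + m_k) + 0 * 1 [ZMOD 4 * q] :=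
          Int.ModEq.add_left _ (Int.ModEq.mul_right _ (Int.modEq_zero_iff_dvd.mpr dvd_rfl))
      _ = -(4 * q + m_k) := by ring
  have hmkc : u ≡ -(4 * q + m_k) [ZMOD m_k] := by
    have h2 : r2 ≡ -4 * q [ZMOD m_k] := pmod_modEq _ _
    have hk2 : kk ≡ (r2 - r1) * inv [ZMOD m_k] := pmod_modEq _ _
    calc u = r1 + 4 * q * kk := hu
      _ ≡ r1 + 4 * q * ((r2 - r1) * Int.gcdA (4 * q) m_k) [ZMOD m_k] :=
          Int.ModEq.add_left _ (Int.ModEq.mul_left _ (hk2.trans (Int.ModEq.mul_left _ hinv_mod)))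
      _ = r1 + (r2 - r1) * (4 * q * Int.gcdA (4 * q) m_k) := by ring
      _ = r1 + (r2 - r1) * (1 - m_k * Int.gcdB (4 * q) m_k) := by rw [hbez]; ring
      _ = r2 + m_k * (-(r2 - r1) * Int.gcdB (4 * q) m_k) := by ring
      _ ≡ r2 + 0 * (-(r2 - r1) * Int.gcdB (4 * q) m_k) [ZMOD m_k] :=
          Int.ModEq.add_left _ (Int.ModEq.mul_right _ (Int.modEq_zero_iff_dvd.mpr dvd_rfl))
      _ = r2 + 0 := by ring
      _ = r2 := by ring
      _ ≡ -4 * q [ZMOD m_k] := h2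
      _ = -(4 * q + m_k) + m_k * 1 := by ring
      _ ≡ -(4 * q + m_k) + 0 * 1 [ZMOD m_k] :=
          Int.ModEq.add_left _ (Int.ModEq.mul_right _ (Int.modEq_zero_iff_dvd.mpr dvd_rfl))
      _ = -(4 * q + m_k) := by ring
  -- combine by coprimality
  have hMdvd : M ∣ -(4 * q + m_k) - u :=
    hc.mul_dvd h4q.dvd hmkc.dvd
  have hMcong : u ≡ -(4 * q + m_k) [ZMOD M] := Int.modEq_iff_dvd.mpr hMdvd
  -- the residue is ≡ 1 (mod 4), so A's filter branch is not taken
  have hres4 : PySem.Int.mod (PySem.Int.mod u M) 4 = 1 := by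
    have h4M : (4 : Int) ∣ M := ⟨q * m_k, by rw [hM]; ring⟩
    have c1 : PySem.Int.mod u M ≡ u [ZMOD 4] := Int.ModEq.of_dvd h4M (pmod_modEq u M)
    have c2 : u ≡ -(4 * q + m_k) [ZMOD 4] := Int.ModEq.of_dvd h4M hMcong
    have c3 : (-(4 * q + m_k)) ≡ 1 [ZMOD 4] := by
      have : (4 : Int) ∣ 1 - -(4 * q + m_k) := ⟨q + k + 1, by rw [hmk]; ring⟩
      exact Int.modEq_iff_dvd.mpr this
    have := (c1.trans (c2.trans c3))
    calc PySem.Int.mod (PySem.Int.mod u M) 4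
        = PySem.Int.mod 1 4 := pmod_congr _ _ 4 (by norm_num) this
      _ = 1 := by decide
  -- now evaluate both ports
  have hcr : chineseRemainder [r1, r2] [4 * q, m_k] = some (PySem.Int.mod u M, M) := by
    rw [cr_pair r1 r2 (4 * q) m_k hg4, ← hinv, ← hkk, ← hu, ← hM]
  have hfinal : PySem.Int.mod u M = PySem.Int.mod (-(4 * q + m_k)) M :=
    pmod_congr u (-(4 * q + m_k)) M hMne hMcong
  unfold generate_prime_witness_rule generate_prime_witness_rule_alt
  rw [← hmk]
  simp only [if_neg hgle, ← hr1, ← hr2, hcr, ← hM, hres4]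
  simp [hfinal]

-- ===== VERDICT (by name: the statement is the Claim_ definition above) =====
theorem generate_prime_witness_rule_spec : Claim_equal_generate_prime_witness_rule := by
  intro k q _hdom hpre
  unfold Spec_generate_prime_witness_rule
  by_cases hg : ((Int.gcd q (4 * k + 3) : Int) > 1)
  · unfold generate_prime_witness_rule generate_prime_witness_rule_alt
    rw [if_pos hg, if_pos hg]
  · have hkm : (4 * k + 3) ≠ 0 := by omega
    have hgcd : Int.gcd q (4 * k + 3) = 1 := by
      have h0 : Int.gcd q (4 * k + 3) ≠ 0 := by
        simp [Int.gcd_eq_zero_iff]; omega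
      omega
    have hq : q ≠ 0 := by
      intro h0
      subst h0
      have : (4 * k + 3).natAbs = 1 := by simpa [Int.gcd] using hgcd
      have : 4 * k + 3 = 1 ∨ 4 * k + 3 = -1 := by
        rcases Int.natAbs_eq (4 * k + 3) with h | h <;> omega
      rcases this with h | h
      · omega
      · exact hpre ⟨by omega, rfl⟩
    exact (main_eq k q hq hgcd).symm ▸ rfl
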